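-- pv_equiv track=rewrite | github.com/hongsy0113/algorithm-study | ndb_book/greedy/1.py | solution
-- ===== SOURCE A (Python) =====
-- def is_complete (group):
--     max_value = group[-1]
--     if max_value <= len(group):
--         return True
--     else:
--         return False
--
-- def solution(people):
--     people.sort()
--
--     temp_group = []
--     answer = 0
--
--     # 순서대로 한명씩 임시 그룹에 넣는다
--     # 그룹이 완성됐다면 count를 증가시키고 임시 그룹을 비운다.
--     for p in people:
--         temp_group.append(p)
--         if is_complete(temp_group):
--             answer += 1
--             temp_group = []
--
--     return answer
-- ===== SOURCE B (Python) =====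
-- def solution(people):
--     # Same in-place sort as A (the caller-visible mutation is preserved).
--     people.sort()
--
--     answer = 0
--     leftover = 0
--     i = 0
--     n = len(people)
--     while i < n:
--         v = people[i]
--         j = i + 1
--         while j < n and people[j] == v:
--             j += 1
--         d = v if v > 1 else 1
--         total = leftover + (j - i)
--         answer += total // d
--         leftover = total % d
--         i = j
--     return answer
-- ===== Notes on version B (the rewrite author's own statement) =====
-- stated objective: alternative
-- what changed: A builds groups element by element by appending to a temporary list and re-reading its last element and length; B scans each run of equal values once and computes the number of groups for the whole run by integer division (total // max(v,1)), carrying only an integer leftover.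
import Mathlib
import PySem

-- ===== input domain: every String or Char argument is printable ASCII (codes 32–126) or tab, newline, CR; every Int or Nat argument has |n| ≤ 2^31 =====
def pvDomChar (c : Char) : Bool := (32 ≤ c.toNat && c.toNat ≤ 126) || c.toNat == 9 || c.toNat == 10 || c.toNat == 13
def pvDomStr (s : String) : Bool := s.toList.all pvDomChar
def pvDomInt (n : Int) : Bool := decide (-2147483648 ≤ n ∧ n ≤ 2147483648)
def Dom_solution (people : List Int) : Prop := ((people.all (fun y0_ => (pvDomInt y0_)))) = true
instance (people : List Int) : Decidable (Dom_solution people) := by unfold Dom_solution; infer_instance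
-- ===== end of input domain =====

-- B replaces A's element-by-element group building (temporary list, re-read last/length)
-- by one integer-division step per run of equal values; objective: alternative algorithm.
-- Like A, B sorts its argument in place; the equivalence proved here is about the return value.


-- ===== PORT A =====
-- group[-1]: in A, is_complete is only ever called on a non-empty group, so the
-- default of .getD is never used; otherwise an exact transliteration.
def is_complete (group : List Int) : Bool :=
  let max_value := (PySem.List.pyGet? group (-1)).getD 0
  decide (max_value ≤ (group.length : Int))

def solutionStep (st : List Int × Int) (p : Int) : List Int × Int :=
  let temp_group := st.1 ++ [p]
  if is_complete temp_group then ([], st.2 + 1) else (temp_group, st.2)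

def solution (people : List Int) : Int :=
  ((PySem.List.sorted people (fun x => x) false).foldl solutionStep ([], 0)).2

-- ===== PORT B =====
-- inner while loop 'j < n and people[j] == v': length of the run of v at the front
def runLen (xs : List Int) (v : Int) : Nat :=
  match xs with
  | [] => 0
  | x :: r => if x = v then runLen r v + 1 else 0

-- outer while loop of B, as recursion on the yet-unscanned suffix
def altGo : List Int → Int → Int → Int
  | [], answer, _ => answer
  | v :: rest, answer, leftover =>
    let r := runLen rest v
    let d : Int := if 1 < v then v else 1
    let total := leftover + ((r : Int) + 1)
    altGo (rest.drop r) (answer + PySem.Int.floordiv total d) (PySem.Int.mod total d)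
termination_by xs => xs.length
decreasing_by simp [List.length_drop]

def solution_alt (people : List Int) : Int :=
  altGo (PySem.List.sorted people (fun x => x) false) 0 0

-- ===== PRECONDITION & SPEC =====
def Spec_solution (people : List Int) (out : Int) : Prop := out = solution_alt people
instance (people : List Int) (out : Int) : Decidable (Spec_solution people out) := by unfold Spec_solution; infer_instance

-- ===== CLAIM (what is proved, stated in full; the proofs are below) =====
def Claim_equal_solution : Prop := ∀ (people : List Int), Dom_solution people → Spec_solution people (solution people)

-- ===== LEMMAS AND PROOFS =====

-- Only the length of A's temp_group and the running answer matter: the appended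
-- element is always the last one, so is_complete(g ++ [p]) ↔ p ≤ |g| + 1.
def absStep (st : Nat × Int) (p : Int) : Nat × Int :=
  if p ≤ (st.1 : Int) + 1 then (0, st.2 + 1) else (st.1 + 1, st.2)

-- divisor of B, as a Nat
def mN (v : Int) : Nat := (if 1 < v then v else 1).toNat

lemma mN_pos (v : Int) : 0 < mN v := by
  unfold mN; split_ifs <;> omega

lemma mN_mono {v w : Int} (h : v ≤ w) : mN v ≤ mN w := by
  unfold mN; split_ifs <;> omega

lemma abs_of_A : ∀ (xs : List Int) (g : List Int) (a : Int),
    (xs.foldl solutionStep (g, a)).2 = (xs.foldl absStep (g.length, a)).2 := by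
  intro xs
  induction xs with
  | nil => intro g a; rfl
  | cons x t ih =>
    intro g a
    have hc : is_complete (g ++ [x]) = decide (x ≤ (g.length : Int) + 1) := by
      unfold is_complete
      rw [PySem.List.pyGet?_neg_one_append_singleton]
      simp
    simp only [List.foldl_cons, solutionStep, absStep, hc]
    by_cases h : x ≤ (g.length : Int) + 1
    · simp [h, ih]
    · simpa [h] using ih (g ++ [x]) a

-- folding A's abstract step over a run of c copies of v, starting below the divisor,
-- is division with remainder by mN v
lemma run_lemma : ∀ (c k : Nat) (a : Int) (v : Int), k < mN v →
    (List.replicate c v).foldl absStep (k, a) =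
      ((k + c) % mN v, a + (((k + c) / mN v : Nat) : Int)) := by
  intro c
  induction c with
  | zero =>
    intro k a v hk
    simp [Nat.mod_eq_of_lt hk, Nat.div_eq_of_lt hk]
  | succ c ih =>
    intro k a v hk
    have hm := mN_pos v
    rw [List.replicate_succ, List.foldl_cons]
    by_cases hv : v ≤ (k : Int) + 1
    · -- group completes: k + 1 = mN v
      have hkv : k + 1 = mN v := by
        unfold mN at hk ⊢; split_ifs at hk ⊢ with h1 <;> omega
      rw [show absStep (k, a) v = (0, a + 1) from by simp [absStep, hv]]
      rw [ih 0 (a + 1) v hm]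
      have he : k + (c + 1) = c + 1 * mN v := by omega
      have h1 : (0 + c) % mN v = (k + (c + 1)) % mN v := by
        rw [he, Nat.add_mul_mod_self_right, Nat.zero_add]
      have h2 : (k + (c + 1)) / mN v = (0 + c) / mN v + 1 := by
        rw [he, Nat.add_mul_div_right _ _ hm, Nat.zero_add]
      rw [h1, h2]
      push_cast
      ring_nf
    · -- not complete yet: k + 1 < mN v
      have hkv : k + 1 < mN v := by
        unfold mN at hk ⊢; split_ifs at hk ⊢ with h1 <;> omega
      rw [show absStep (k, a) v = (k + 1, a) from by simp [absStep, hv]]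
      rw [ih (k + 1) a v hkv]
      have h1 : k + 1 + c = k + (c + 1) := by omega
      rw [h1]

-- the front of xs is a run of v of length runLen xs v
lemma runLen_decomp : ∀ (xs : List Int) (v : Int),
    xs = List.replicate (runLen xs v) v ++ xs.drop (runLen xs v) := by
  intro xs
  induction xs with
  | nil => intro v; rfl
  | cons x t ih =>
    intro v
    unfold runLen
    by_cases h : x = v
    · simp only [if_pos h, List.replicate_succ, List.cons_append, List.drop_succ_cons]
      rw [h]
      exact congrArg _ (ih v)
    · simp [if_neg h]

lemma main_lemma : ∀ (n : Nat) (xs : List Int), xs.length ≤ n →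
    xs.Pairwise (· ≤ ·) → ∀ (k : Nat) (a : Int), (∀ w ∈ xs, k < mN w) →
    (xs.foldl absStep (k, a)).2 = altGo xs a (k : Int) := by
  intro n
  induction n with
  | zero =>
    intro xs hlen _ k a _
    have : xs = [] := by cases xs <;> simp_all
    subst this; simp [altGo]
  | succ n ih =>
    intro xs hlen hsort k a hk
    cases xs with
    | nil => simp [altGo]
    | cons v rest =>
      set r := runLen rest v with hr
      have hdec : v :: rest = List.replicate (r + 1) v ++ rest.drop r := by
        rw [List.replicate_succ, List.cons_append]
        exact congrArg _ (runLen_decomp rest v)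
      have hkv : k < mN v := hk v (by simp)
      have hrest : ∀ w ∈ rest, v ≤ w := by
        intro w hw; exact (List.pairwise_cons.mp hsort).1 w hw
      -- left side: split the fold at the run boundary
      conv_lhs => rw [hdec]
      rw [List.foldl_append, run_lemma (r + 1) k a v hkv]
      -- right side: one step of altGo
      conv_rhs => rw [altGo.eq_def]
      simp only []
      have hd : (if 1 < v then v else (1:Int)) = ((mN v : Nat) : Int) := by
        unfold mN; split_ifs <;> omega
      have htot : (k : Int) + ((r : Int) + 1) = ((k + (r + 1) : Nat) : Int) := by push_cast; ring
      rw [hd, htot, PySem.Int.floordiv_natCast, PySem.Int.mod_natCast]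
      -- apply IH to the remaining suffix
      have hsub : (rest.drop r).Sublist (v :: rest) := ((List.drop_sublist r rest).trans (List.sublist_cons_self v rest))
      have hlen' : (rest.drop r).length ≤ n := by
        simp only [List.length_drop]
        simp only [List.length_cons] at hlen
        omega
      have hsort' : (rest.drop r).Pairwise (· ≤ ·) := hsort.sublist hsub
      have hk' : ∀ w ∈ rest.drop r, (k + (r + 1)) % mN v < mN w := by
        intro w hw
        have h1 : (k + (r + 1)) % mN v < mN v := Nat.mod_lt _ (mN_pos v)
        have h2 : mN v ≤ mN w := mN_mono (hrest w (List.mem_of_mem_drop hw))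
        omega
      exact ih (rest.drop r) hlen' hsort' _ _ hk'

-- ===== VERDICT (by name: the statement is the Claim_ definition above) =====
theorem solution_spec : Claim_equal_solution := by
  unfold Claim_equal_solution
  intro people _
  unfold Spec_solution solution solution_alt
  set xs := PySem.List.sorted people (fun x => x) false with hxs
  have hsort : xs.Pairwise (· ≤ ·) := by
    simpa using PySem.List.sorted_pairwise people (fun x => x)
  rw [abs_of_A]
  simpa using main_lemma xs.length xs (le_refl _) hsort 0 0
    (fun w _ => mN_pos w)
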